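-- pv_equiv track=rewrite | github.com/FrancoisBrucker/cours_informatique | docs/src/enseignements/MPCI/programmation-algorithmes/annales/2024-2025/ds-algorithmie/code/fonctions.py | verif_ligne
-- ===== SOURCE A (Python) =====
-- def verif_ligne(sol, cle_l, i):
--     nc = len(sol)
--
--     i_bloc = 0
--     taille = 0
--
--     for j in range(nc):
--         couleur_case = sol[i][j]
--         if couleur_case == 1:
--             taille = taille + 1
--         if taille > 0 and (couleur_case == 0 or j + 1 == nc):
--             if i_bloc < len(cle_l[i]) and taille == cle_l[i][i_bloc]:
--                 taille = 0
--                 i_bloc = i_bloc + 1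
--             else:
--                 return False
--     return i_bloc == len(cle_l[i])
-- ===== SOURCE B (Python) =====
-- def verif_ligne(sol, cle_l, i):
--     blocks = []
--     taille = 0
--     for c in sol[i]:
--         if c == 1:
--             taille = taille + 1
--         elif c == 0 and taille > 0:
--             blocks.append(taille)
--             taille = 0
--     if taille > 0:
--         blocks.append(taille)
--     return blocks == list(cle_l[i])
-- ===== Notes on version B (the rewrite author's own statement) =====
-- stated objective: alternative
-- what changed: B builds the row's block-size list in one pass (accumulator flushed on 0-cells and at row end) and compares it to the clue list, instead of A's inline verification against a clue index with early returns; Pre_ excludes inputs where i is invalid for sol or cle_l or row i is shorter than len(sol) (A raises IndexError or returns an early False without reading the whole row, B's whole-row scan raises or returns its own verdict), and ragged grids whose row i has a 1 beyond column len(sol) (which cells belong to the row is unspecified: A verifies the first len(sol) cells only, B the whole row).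
-- outside the precondition, e.g. on verif_ligne([], [[-1, 6], [188]], 0): A returns False, B raises IndexError; on verif_ligne([[1, 0], [0], [0]], [[], [], []], 0): A returns False, B returns False; on verif_ligne([[0, 1]], [[1]], 0): A returns False, B returns True
import Mathlib
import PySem

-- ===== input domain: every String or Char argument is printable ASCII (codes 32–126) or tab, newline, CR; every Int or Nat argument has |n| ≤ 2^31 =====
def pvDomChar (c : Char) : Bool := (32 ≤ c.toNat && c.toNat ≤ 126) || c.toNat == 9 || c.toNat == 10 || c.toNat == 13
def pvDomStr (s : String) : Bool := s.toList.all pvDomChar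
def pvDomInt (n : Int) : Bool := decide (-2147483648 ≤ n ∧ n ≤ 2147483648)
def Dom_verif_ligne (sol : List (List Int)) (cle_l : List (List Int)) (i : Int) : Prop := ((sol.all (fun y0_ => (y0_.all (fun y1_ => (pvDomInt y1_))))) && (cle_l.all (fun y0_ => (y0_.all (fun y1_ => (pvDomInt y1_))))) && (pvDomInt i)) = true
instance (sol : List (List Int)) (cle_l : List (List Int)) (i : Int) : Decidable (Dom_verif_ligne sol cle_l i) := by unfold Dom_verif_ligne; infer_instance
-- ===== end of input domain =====

-- B separates representation from comparison: one pass builds the row's block-size list,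
-- then compares it to the clue, instead of A's inline clue-index check with early returns.

-- ===== PORT A =====
-- A's loop body over j in range(nc); the early 'return False' is an absorbing 'none' state,
-- some (i_bloc, taille) is the live loop state.
def aStep (row cle : List Int) (nc : Nat) (st : Option (Int × Int)) (j : Int) : Option (Int × Int) :=
  match st with
  | none => none
  | some (i_bloc, taille) =>
    let couleur_case := PySem.List.pyGetD row j 0
    let taille := if couleur_case = 1 then taille + 1 else taille
    if 0 < taille ∧ (couleur_case = 0 ∨ j + 1 = (nc : Int)) then
      if i_bloc < (cle.length : Int) ∧ taille = PySem.List.pyGetD cle i_bloc 0 then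
        some (i_bloc + 1, (0 : Int))
      else
        none
    else
      some (i_bloc, taille)

def verif_ligne (sol : List (List Int)) (cle_l : List (List Int)) (i : Int) : Bool :=
  let nc : Nat := sol.length
  let row : List Int := PySem.List.pyGetD sol i []
  let cle : List Int := PySem.List.pyGetD cle_l i []
  match (PySem.List.pyRange 0 (nc : Int) 1).foldl (aStep row cle nc) (some ((0 : Int), (0 : Int))) with
  | none => false
  | some (i_bloc, _) => i_bloc == (cle.length : Int)

-- ===== PORT B =====
-- B's loop body over the cells of sol[i]; state = (blocks, taille).
def bStep (st : List Int × Int) (c : Int) : List Int × Int :=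
  let (blocks, taille) := st
  if c = 1 then (blocks, taille + 1)
  else if c = 0 ∧ 0 < taille then (blocks ++ [taille], 0)
  else (blocks, taille)

def verif_ligne_alt (sol : List (List Int)) (cle_l : List (List Int)) (i : Int) : Bool :=
  let p := (PySem.List.pyGetD sol i []).foldl bStep ([], 0)
  let blocks := if 0 < p.2 then p.1 ++ [p.2] else p.1
  blocks == PySem.List.pyGetD cle_l i []

-- ===== PRECONDITION & SPEC =====
-- Pre_ excludes (a) inputs where i is an invalid index for sol or cle_l or row i is shorter
-- than len(sol) (A indexes columns by nc = len(sol)): there A raises IndexError, or returns an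
-- early False while never reading sol[i] (empty sol) or reading only part of the short row,
-- and B's whole-row scan raises or returns its own verdict; and (b) ragged grids whose row i
-- has a filled cell (a 1) beyond column len(sol): on such grids which cells belong to the row
-- is unspecified — A verifies the first len(sol) cells only, B verifies the whole row.
def Pre_verif_ligne (sol : List (List Int)) (cle_l : List (List Int)) (i : Int) : Prop :=
  PySem.Raise.InRange sol.length i ∧ PySem.Raise.InRange cle_l.length i ∧
    sol.length ≤ (PySem.List.pyGetD sol i []).length ∧
    ∀ c ∈ (PySem.List.pyGetD sol i []).drop sol.length, c ≠ 1
instance (sol : List (List Int)) (cle_l : List (List Int)) (i : Int) : Decidable (Pre_verif_ligne sol cle_l i) := by unfold Pre_verif_ligne; infer_instance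

def pvWitness_verif_ligne : List (List Int) × List (List Int) × Int :=
  ([[1, 1, 0], [0, 1, 2], [1, 0, 1]], [[2], [1], [1, 1]], 2)

def Spec_verif_ligne (sol : List (List Int)) (cle_l : List (List Int)) (i : Int) (out : Bool) : Prop := out = verif_ligne_alt sol cle_l i
instance (sol : List (List Int)) (cle_l : List (List Int)) (i : Int) (out : Bool) : Decidable (Spec_verif_ligne sol cle_l i out) := by unfold Spec_verif_ligne; infer_instance

-- ===== CLAIM (what is proved, stated in full; the proofs are below) =====
def Claim_equal_verif_ligne : Prop := ∀ (sol : List (List Int)) (cle_l : List (List Int)) (i : Int), Dom_verif_ligne sol cle_l i → Pre_verif_ligne sol cle_l i → Spec_verif_ligne sol cle_l i (verif_ligne sol cle_l i)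

-- ===== LEMMAS AND PROOFS =====

-- The block list B builds from the remaining cells, given the current open-block size t.
def bRec : List Int → Int → List Int
  | [], t => if 0 < t then [t] else []
  | c :: rest, t =>
    if c = 1 then bRec rest (t + 1)
    else if c = 0 ∧ 0 < t then t :: bRec rest 0
    else bRec rest t

-- B's fold computes bRec.
lemma B_loop (l : List Int) (bl : List Int) (t : Int) :
    (if 0 < (l.foldl bStep (bl, t)).2
     then (l.foldl bStep (bl, t)).1 ++ [(l.foldl bStep (bl, t)).2]
     else (l.foldl bStep (bl, t)).1) = bl ++ bRec l t := by
  induction l generalizing bl t with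
  | nil => by_cases h : 0 < t <;> simp [bRec, h]
  | cons c rest ih =>
    simp only [List.foldl_cons, bRec, bStep]
    by_cases h1 : c = 1
    · simp [h1, ih]
    · by_cases h0 : c = 0 ∧ 0 < t
      · simp [h0, ih]
      · simp [h1, h0, ih]

-- the 'none' state is absorbing
lemma A_none (l : List Int) (row cle : List Int) (nc : Nat) :
    l.foldl (aStep row cle nc) none = none := by
  induction l with
  | nil => rfl
  | cons x xs ih => simpa [aStep] using ih

-- A's loop from position a with open block t and clue split cleDone ++ cleRem equals
-- comparing bRec of the remaining cells with cleRem.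
lemma A_loop (row cle cleDone cleRem : List Int) (nc a : Nat) (t : Int) (k : Nat)
    (hk : nc - a = k) (hnc : nc ≤ row.length) (ha : a ≤ nc) (ht : 0 ≤ t)
    (hend : a = nc → t = 0) (hcle : cle = cleDone ++ cleRem) :
    (match (PySem.List.pyRange (a : Int) (nc : Int) 1).foldl (aStep row cle nc)
        (some ((cleDone.length : Int), t)) with
     | none => false
     | some (i_bloc, _) => i_bloc == (cle.length : Int))
    = (bRec ((row.take nc).drop a) t == cleRem) := by
  induction k generalizing a cleDone cleRem t with
  | zero =>
    have haeq : a = nc := by omega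
    subst haeq
    have ht0 : t = 0 := hend rfl
    subst ht0
    have : PySem.List.pyRange (a : Int) (a : Int) 1 = [] := by
      simp [PySem.List.pyRange]
    rw [this]
    simp [bRec, hcle]
    rcases cleRem with _ | ⟨x, r⟩
    · simp
    · simp
      omega
  | succ k ih =>
    have halt : a < nc := by omega
    have hrange : PySem.List.pyRange (a : Int) (nc : Int) 1
        = (a : Int) :: PySem.List.pyRange ((a : Int) + 1) (nc : Int) 1 := by
      exact PySem.List.pyRange_one_cons (by exact_mod_cast halt)
    have haRow : a < row.length := by omega
    have hget : PySem.List.pyGetD row (a : Int) 0 = row[a] := by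
      simp [PySem.List.pyGetD_natCast, List.getD_eq_getElem?_getD, haRow]
    have hdrop : (row.take nc).drop a = row[a] :: (row.take nc).drop (a + 1) := by
      have h1 : a < (row.take nc).length := by simp; omega
      rw [List.drop_eq_getElem_cons h1]
      congr 1
      simp [List.getElem_take]
    have hcast : ((a : Int) + 1) = ((a + 1 : Nat) : Int) := by push_cast; ring
    have hlen : cle.length = cleDone.length + cleRem.length := by simp [hcle]
    rw [hrange, List.foldl_cons, hdrop]
    simp only [aStep, hget]
    by_cases hc1 : row[a] = 1
    · -- cell is 1: open block grows
      have hpos1 : 0 < t + 1 := by omega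
      by_cases hlast : a + 1 = nc
      · -- last column: end flush
        have hlastI : (a : Int) + 1 = (nc : Int) := by omega
        have hdrop1 : (row.take nc).drop (a + 1) = [] := by
          apply List.drop_eq_nil_of_le; simp; omega
        rcases cleRem with _ | ⟨r0, rest⟩
        · -- clue exhausted: flush fails
          have hnlt : ¬ ((cleDone.length : Int) < (cle.length : Int)) := by
            simp at hlen; omega
          simp [A_none, bRec, hdrop1, hc1, hlastI, hnlt, ht]
        · have hr0 : PySem.List.pyGetD cle ((cleDone.length : Int)) 0 = r0 := by
            rw [PySem.List.pyGetD_natCast, hcle]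
            simp [List.getD, List.getElem?_append_right]
          have hlt : ((cleDone.length : Int) < (cle.length : Int)) := by
            simp at hlen; omega
          by_cases hm : t + 1 = r0
          · -- flush succeeds, then the loop ends
            have IH := ih (cleDone ++ [r0]) rest (a + 1) 0 (by omega) (by omega)
              le_rfl (fun _ => rfl) (by simp [hcle])
            rw [← hcast] at IH
            have hst : (((cleDone ++ [r0]).length : Nat) : Int) = ((cleDone.length : Int) + 1) := by
              simp
            rw [hst] at IH
            have hpos0 : (0 : Int) < r0 := by omega
            simp [bRec, hdrop1, hc1, hlastI, hpos0, hpos1, hr0, hlt, hm, ht]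
            rcases rest with _ | ⟨x, r⟩ <;> simp [hcle] <;> omega
          · -- flush fails
            simp [A_none, bRec, hdrop1, hc1, hlastI, hpos1, hr0, hlt, hm, ht]
      · -- not last, cell 1 ≠ 0: no flush
        have hlastI : ¬ ((a : Int) + 1 = (nc : Int)) := by omega
        have IH := ih cleDone cleRem (a + 1) (t + 1) (by omega) (by omega) (by omega)
          (fun h => absurd h hlast) hcle
        rw [← hcast] at IH
        simp only [hc1, if_pos rfl, hlastI]
        simp only [bRec, hc1, if_pos rfl]
        simpa using IH
    · -- cell ≠ 1: block size unchanged
      by_cases hflush : 0 < t ∧ (row[a] = 0 ∨ (a : Int) + 1 = (nc : Int))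
      · -- flush fires with size t
        obtain ⟨hpos, hor⟩ := hflush
        have hbr2 : bRec (row[a] :: (row.take nc).drop (a + 1)) t = t :: bRec ((row.take nc).drop (a + 1)) 0 := by
          by_cases h0 : row[a] = 0
          · simp [bRec, hc1, h0, hpos]
          · have hl : a + 1 = nc := by
              rcases hor with h | h
              · exact absurd h h0
              · omega
            have hdrop1 : (row.take nc).drop (a + 1) = [] := by
              apply List.drop_eq_nil_of_le; simp; omega
            simp [bRec, hc1, h0, hpos, hdrop1]
        rcases cleRem with _ | ⟨r0, rest⟩
        · have hnlt : ¬ ((cleDone.length : Int) < (cle.length : Int)) := by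
            simp at hlen; omega
          simp [A_none, hbr2, hc1, hpos, hor, hnlt, ht]
        · have hr0 : PySem.List.pyGetD cle ((cleDone.length : Int)) 0 = r0 := by
            rw [PySem.List.pyGetD_natCast, hcle]
            simp [List.getD, List.getElem?_append_right]
          have hlt : ((cleDone.length : Int) < (cle.length : Int)) := by
            simp at hlen; omega
          by_cases hm : t = r0
          · subst hm
            have IH := ih (cleDone ++ [t]) rest (a + 1) 0 (by omega) (by omega)
              le_rfl (fun _ => rfl) (by simp [hcle])
            rw [← hcast] at IH
            have hst : (((cleDone ++ [t]).length : Nat) : Int) = ((cleDone.length : Int) + 1) := by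
              simp
            rw [hst] at IH
            simp [IH, hbr2, hc1, hpos, hor, hr0, hlt, ht]
          · simp [A_none, hbr2, hc1, hpos, hor, hr0, hlt, hm, ht]
      · -- no flush
        have ht0 : a + 1 = nc → t = 0 := by
          intro hl
          by_contra hne
          exact hflush ⟨by omega, Or.inr (by omega)⟩
        have IH := ih cleDone cleRem (a + 1) t (by omega) (by omega) ht ht0 hcle
        rw [← hcast] at IH
        have hb : bRec (row[a] :: (row.take nc).drop (a + 1)) t
            = bRec ((row.take nc).drop (a + 1)) t := by
          by_cases h0 : row[a] = 0
          · have : ¬ 0 < t := fun hp => hflush ⟨hp, Or.inl h0⟩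
            simp [bRec, hc1, h0, this]
          · simp [bRec, hc1, h0]
        rw [hb]
        simp [IH, hc1, hflush, ht]

-- a list with no 1-cell adds nothing but the pending end-flush
lemma bRec_no_one (l : List Int) (t : Int) (h : ∀ c ∈ l, c ≠ 1) :
    bRec l t = if 0 < t then [t] else [] := by
  induction l generalizing t with
  | nil => rfl
  | cons c rest ih =>
    have hc : c ≠ 1 := h c (by simp)
    have hrest : ∀ c ∈ rest, c ≠ 1 := fun c hm => h c (by simp [hm])
    by_cases h0 : c = 0 ∧ 0 < t
    · simp [bRec, hc, h0, ih 0 hrest, h0.2]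
    · simp [bRec, hc, h0, ih t hrest]

-- appending a 1-free tail does not change the block list
lemma bRec_append_no_one (xs ys : List Int) (t : Int) (h : ∀ c ∈ ys, c ≠ 1) :
    bRec (xs ++ ys) t = bRec xs t := by
  induction xs generalizing t with
  | nil => simpa [bRec] using bRec_no_one ys t h
  | cons c rest ih =>
    by_cases hc : c = 1
    · simp [bRec, hc, ih]
    · by_cases h0 : c = 0 ∧ 0 < t
      · simp [bRec, hc, h0, ih]
      · simp [bRec, hc, h0, ih]

-- ===== VERDICT =====
theorem verif_ligne_spec : Claim_equal_verif_ligne := by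
  intro sol cle_l i _ hpre
  obtain ⟨h1, h2, h3, h4⟩ := hpre
  unfold Spec_verif_ligne verif_ligne verif_ligne_alt
  have hA := A_loop (PySem.List.pyGetD sol i []) (PySem.List.pyGetD cle_l i [])
    [] (PySem.List.pyGetD cle_l i []) sol.length 0 0 sol.length
    (by omega) h3 (Nat.zero_le _) le_rfl (fun _ => rfl) (by simp)
  have hB := B_loop (PySem.List.pyGetD sol i []) [] 0
  have hsplit : PySem.List.pyGetD sol i []
      = (PySem.List.pyGetD sol i []).take sol.length ++ (PySem.List.pyGetD sol i []).drop sol.length :=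
    (List.take_append_drop _ _).symm
  have htail : bRec (PySem.List.pyGetD sol i []) 0 = bRec ((PySem.List.pyGetD sol i []).take sol.length) 0 := by
    conv_lhs => rw [hsplit]
    exact bRec_append_no_one _ _ 0 h4
  simp only [List.nil_append, List.drop_zero, Nat.cast_zero, List.length_nil] at hA hB
  rw [htail] at hB
  simp [hA, hB]
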